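-- pv_equiv track=rewrite | github.com/ivan-sincek/wordlist-extender | src/wordlist_extender.py | transform_words
-- ===== SOURCE A (Python) =====
-- def transform_words(wordlist, transform = "all"):
-- 	tmp = []
-- 	if transform == "capitalize":
-- 		for word in wordlist:
-- 			tmp.append(word.capitalize())
-- 	elif transform == "lowercase":
-- 		for word in wordlist:
-- 			tmp.append(word.lower())
-- 	elif transform == "uppercase":
-- 		for word in wordlist:
-- 			tmp.append(word.upper())
-- 	elif transform == "all":
-- 		for word in wordlist:
-- 			tmp.extend([word.capitalize(), word.lower(), word.upper()])
-- 	else: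
-- 		tmp = wordlist
-- 	return tmp
-- ===== SOURCE B (Python) =====
-- def transform_words(wordlist, transform = "all"):
-- 	# Staged strategy: first materialize all three transformed columns,
-- 	# then assemble the output row-by-row from the selected column indices.
-- 	columns = [[word.capitalize() for word in wordlist],
-- 	           [word.lower() for word in wordlist],
-- 	           [word.upper() for word in wordlist]]
-- 	pick = {"capitalize": [0], "lowercase": [1], "uppercase": [2], "all": [0, 1, 2]}
-- 	if transform not in pick:
-- 		return wordlist
-- 	sel = pick[transform]
-- 	return [columns[j][i] for i in range(len(wordlist)) for j in sel]
-- ===== Notes on version B (the rewrite author's own statement) =====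
-- stated objective: alternative
-- what changed: Instead of one mode-selected loop, B first materializes all three transformed columns (capitalize/lower/upper lists), then assembles the output by indexing the selected columns row by row; it trades extra passes (always building all three columns) for a uniform assembly step.
import Mathlib
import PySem

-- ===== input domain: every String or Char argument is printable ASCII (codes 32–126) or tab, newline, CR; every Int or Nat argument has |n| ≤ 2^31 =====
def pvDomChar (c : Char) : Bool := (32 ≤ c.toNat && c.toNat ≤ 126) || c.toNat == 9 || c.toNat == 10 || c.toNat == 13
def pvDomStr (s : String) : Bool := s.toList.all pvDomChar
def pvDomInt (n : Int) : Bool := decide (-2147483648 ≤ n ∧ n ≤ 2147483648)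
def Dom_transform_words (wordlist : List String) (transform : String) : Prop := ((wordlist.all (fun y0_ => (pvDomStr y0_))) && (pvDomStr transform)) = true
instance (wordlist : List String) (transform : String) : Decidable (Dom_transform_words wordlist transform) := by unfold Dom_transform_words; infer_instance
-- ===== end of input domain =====

-- B first materializes all three transformed columns, then assembles the output by indexing the selected columns row by row (alternative decomposition, same cost class).
-- ===== PORT A =====
-- word.capitalize(): upper-case the first character, lower-case the rest (exact on the ASCII domain Dom_ admits)
def pyCapitalize (s : String) : String :=
  match s.toList with
  | [] => s
  | c :: cs => String.ofList (PySem.Chars.upperChar c :: PySem.Chars.lower cs)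

def transform_words (wordlist : List String) (transform : String) : List String :=
  if transform = "capitalize" then
    wordlist.foldl (fun tmp word => tmp ++ [pyCapitalize word]) []
  else if transform = "lowercase" then
    wordlist.foldl (fun tmp word => tmp ++ [PySem.Str.lower word]) []
  else if transform = "uppercase" then
    wordlist.foldl (fun tmp word => tmp ++ [PySem.Str.upper word]) []
  else if transform = "all" then
    wordlist.foldl (fun tmp word => tmp ++ [pyCapitalize word, PySem.Str.lower word, PySem.Str.upper word]) []
  else wordlist

-- ===== PORT B =====
-- columns[j][i] in Source B: j is drawn from the pick table and i from range(len(wordlist)), so both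
-- indices are always in range; getD is exact here (the IndexError case is unreachable).
def transform_words_alt (wordlist : List String) (transform : String) : List String :=
  let columns : List (List String) :=
    [wordlist.map pyCapitalize, wordlist.map PySem.Str.lower, wordlist.map PySem.Str.upper]
  let pick : List (String × List Nat) :=
    [("capitalize", [0]), ("lowercase", [1]), ("uppercase", [2]), ("all", [0, 1, 2])]
  match pick.lookup transform with
  | none => wordlist
  | some sel =>
      (List.range wordlist.length).flatMap (fun i => sel.map (fun j => (columns.getD j []).getD i ""))

-- ===== PRECONDITION & SPEC =====
def Spec_transform_words (wordlist : List String) (transform : String) (out : List String) : Prop := out = transform_words_alt wordlist transform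
instance (wordlist : List String) (transform : String) (out : List String) : Decidable (Spec_transform_words wordlist transform out) := by unfold Spec_transform_words; infer_instance

-- ===== CLAIM (what is proved, stated in full; the proofs are below) =====
def Claim_equal_transform_words : Prop := ∀ (wordlist : List String) (transform : String), Dom_transform_words wordlist transform → Spec_transform_words wordlist transform (transform_words wordlist transform)

-- ===== LEMMAS AND PROOFS =====
-- Row-major assembly from per-function columns equals a per-word flatMap.
theorem pv_rows_eq_flatMap (xs : List String) (fs : List (String → String)) :
    (List.range xs.length).flatMap (fun i => fs.map (fun f => (xs.map f).getD i "")) =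
      xs.flatMap (fun w => fs.map (fun f => f w)) := by
  induction xs with
  | nil => simp
  | cons w ws ih =>
      simp only [List.length_cons, List.range_succ_eq_map, List.flatMap_cons, List.flatMap_map]
      simp only [List.map_cons, List.getD_cons_zero, List.getD_cons_succ]
      rw [ih]

-- One branch of the verdict: A's foldl-append loop equals B's column-indexed assembly.
theorem pv_branch (xs : List String) (fs : List (String → String)) :
    xs.foldl (fun tmp w => tmp ++ fs.map (fun f => f w)) [] =
      (List.range xs.length).flatMap (fun i => fs.map (fun f => (xs.map f).getD i "")) := by
  rw [PySem.List.foldl_append_eq_flatMap, pv_rows_eq_flatMap]; simp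

-- ===== VERDICT (by name: the statement is the Claim_ definition above) =====
theorem transform_words_spec : Claim_equal_transform_words := by
  intro wordlist transform _
  unfold Spec_transform_words transform_words transform_words_alt
  split_ifs with h1 h2 h3 h4
  · subst h1
    simp only [List.lookup, beq_self_eq_true, List.map_cons, List.map_nil,
      List.getD_cons_zero]
    exact pv_branch wordlist [pyCapitalize]
  · subst h2
    simp only [List.lookup, beq_self_eq_true, List.map_cons, List.map_nil,
      List.getD_cons_zero, List.getD_cons_succ, show ("lowercase" == "capitalize") = false from rfl]
    exact pv_branch wordlist [PySem.Str.lower]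
  · subst h3
    simp only [List.lookup, beq_self_eq_true, List.map_cons, List.map_nil,
      List.getD_cons_zero, List.getD_cons_succ,
      show ("uppercase" == "capitalize") = false from rfl,
      show ("uppercase" == "lowercase") = false from rfl]
    exact pv_branch wordlist [PySem.Str.upper]
  · subst h4
    simp only [List.lookup, beq_self_eq_true, List.map_cons, List.map_nil,
      List.getD_cons_zero, List.getD_cons_succ,
      show ("all" == "capitalize") = false from rfl,
      show ("all" == "lowercase") = false from rfl,
      show ("all" == "uppercase") = false from rfl]
    exact pv_branch wordlist [pyCapitalize, PySem.Str.lower, PySem.Str.upper]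
  · simp only [List.lookup,
      beq_eq_false_iff_ne.mpr h1, beq_eq_false_iff_ne.mpr h2,
      beq_eq_false_iff_ne.mpr h3, beq_eq_false_iff_ne.mpr h4]
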